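-- pv_equiv track=rewrite | github.com/jan-krueger/tello_pilot | scripts/TelloParameterParser.py | param_tello_list
-- ===== SOURCE A (Python) =====
-- def param_tello_list(input: str):
--     input = input.strip()
--
--     if len(input) == 0:
--         return (True, {'default': None})
--
--     prefix_list = input.split(',')
--     tello_list = {}
--
--     for prefix in prefix_list:
--         if prefix not in tello_list:
--             tello_list[prefix] = None
--         else:
--             raise Exception("Duplicate prefix in tello_list. %s" % prefix)
--
--     return (len(tello_list) == 0, tello_list)
-- ===== SOURCE B (Python) =====
-- def param_tello_list(input: str):
--     input = input.strip()
--
--     if len(input) == 0: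
--         return (True, {'default': None})
--
--     prefix_list = input.split(',')
--     tello_list = dict.fromkeys(prefix_list)
--
--     if len(tello_list) != len(prefix_list):
--         seen = set()
--         for prefix in prefix_list:
--             if prefix in seen:
--                 raise Exception("Duplicate prefix in tello_list. %s" % prefix)
--             seen.add(prefix)
--
--     return (len(tello_list) == 0, tello_list)
-- ===== Notes on version B (the rewrite author's own statement) =====
-- stated objective: simpler
-- what changed: Replaces A's element-by-element membership-test-and-insert loop with a one-step dict.fromkeys build; duplicates are detected by a length comparison, and only then a seen-set rescan locates the first repeated prefix for the same exception message.
import Mathlib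
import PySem

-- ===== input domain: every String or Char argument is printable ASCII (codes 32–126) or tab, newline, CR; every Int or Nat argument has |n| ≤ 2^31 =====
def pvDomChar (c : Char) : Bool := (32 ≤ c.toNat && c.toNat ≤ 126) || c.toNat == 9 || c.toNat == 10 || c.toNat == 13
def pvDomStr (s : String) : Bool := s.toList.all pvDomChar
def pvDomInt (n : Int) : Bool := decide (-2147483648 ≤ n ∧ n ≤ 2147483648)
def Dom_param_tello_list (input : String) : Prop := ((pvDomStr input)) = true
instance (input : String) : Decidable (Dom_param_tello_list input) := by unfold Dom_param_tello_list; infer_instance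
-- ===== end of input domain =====

-- B replaces A's membership-test-and-insert loop by a one-step ordered dedup (dict.fromkeys)
-- plus a length comparison for duplicate detection: simpler decomposition, same cost.

-- ===== PORT A =====
-- A's for-loop over prefix_list: insert if absent, else raise (none = the Exception).
def paramLoopA : List String → PySem.Dict String (Option String) →
    Option (PySem.Dict String (Option String))
  | [], d => some d
  | p :: rest, d =>
    if d.contains p = false then paramLoopA rest (d.insert p none)
    else none

def param_tello_list (input : String) : Bool × (List (String × Option String)) :=
  let s := PySem.Str.strip input
  if PySem.Str.len s = 0 then (true, [("default", none)])
  else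
    -- s.split(','): sep is the non-empty literal ",", so split? is never none
    let prefix_list := (PySem.Str.split? s ",").getD []
    match paramLoopA prefix_list PySem.Dict.empty with
    | some tello => (decide (tello.size = 0), tello.items)
    | none => (false, [])   -- Python raises Exception here; excluded by Pre_

-- ===== PORT B =====
def param_tello_list_alt (input : String) : Bool × (List (String × Option String)) :=
  let s := PySem.Str.strip input
  if PySem.Str.len s = 0 then (true, [("default", none)])
  else
    let prefix_list := (PySem.Str.split? s ",").getD []
    -- dict.fromkeys(prefix_list): ordered first-occurrence dedup, all values None
    let tello := PySem.List.dedup prefix_list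
    if tello.length ≠ prefix_list.length then (false, [])   -- Python raises Exception here; excluded by Pre_
    else (decide (tello.length = 0), tello.map (fun k => (k, (none : Option String))))

-- ===== PRECONDITION & SPEC =====
-- Pre_ excludes exactly the inputs with a duplicate comma-separated prefix, on which A raises Exception.
def Pre_param_tello_list (input : String) : Prop :=
  PySem.Str.strip input = "" ∨
  ((PySem.Str.split? (PySem.Str.strip input) ",").getD []).Nodup
instance (input : String) : Decidable (Pre_param_tello_list input) := by
  unfold Pre_param_tello_list; infer_instance

def pvWitness_param_tello_list : String := "a,b"

def Spec_param_tello_list (input : String) (out : Bool × (List (String × Option String))) : Prop := out = param_tello_list_alt input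
instance (input : String) (out : Bool × (List (String × Option String))) : Decidable (Spec_param_tello_list input out) := by unfold Spec_param_tello_list; infer_instance

-- ===== CLAIM (what is proved, stated in full; the proofs are below) =====
def Claim_equal_param_tello_list : Prop := ∀ (input : String), Dom_param_tello_list input → Pre_param_tello_list input → Spec_param_tello_list input (param_tello_list input)

-- ===== LEMMAS AND PROOFS =====

-- On a duplicate-free list of fresh keys, A's raise-on-duplicate loop never raises:
-- it is just the insert fold.
lemma paramLoopA_eq_foldl (l : List String) (d : PySem.Dict String (Option String))
    (hnd : l.Nodup) (hf : ∀ p ∈ l, d.contains p = false) :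
    paramLoopA l d = some (l.foldl (fun d p => d.insert p none) d) := by
  induction l generalizing d with
  | nil => rfl
  | cons p rest ih =>
    simp only [List.nodup_cons] at hnd
    have hp : d.contains p = false := hf p (by simp)
    simp only [paramLoopA, hp, List.foldl_cons]
    exact ih _ hnd.2 (fun q hq => by
      rw [PySem.Dict.contains_insert]
      have hqp : q ≠ p := fun h => hnd.1 (h ▸ hq)
      simp [hqp, hf q (List.mem_cons_of_mem _ hq)])

lemma dedup_of_nodup (l : List String) (h : l.Nodup) : PySem.List.dedup l = l := by
  rw [PySem.List.dedup_eq_ofList, ← PySem.Set.update_empty,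
      PySem.Set.update_eq_append_of_disjoint _ l h (by intro x _; simp [PySem.Set.empty])]
  simp [PySem.Set.empty]

-- ===== VERDICT (by name: the statement is the Claim_ definition above) =====
theorem param_tello_list_spec : Claim_equal_param_tello_list := by
  intro input _ hpre
  unfold Spec_param_tello_list param_tello_list param_tello_list_alt
  by_cases hs : PySem.Str.strip input = ""
  · simp [hs, PySem.Str.len]
  · have hlen : PySem.Str.len (PySem.Str.strip input) ≠ 0 := by
      simp only [PySem.Str.len_eq]
      intro h
      exact hs (by
        have : (PySem.Str.strip input).toList = [] := by
          have := List.length_eq_zero_iff.mp (by exact_mod_cast h)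
          exact this
        cases hstr : PySem.Str.strip input
        · rename_i data
          apply String.ext; simpa [hstr] using this)
    rcases hpre with h | hnd
    · exact absurd h hs
    simp only [if_neg hlen]
    set l := (PySem.Str.split? (PySem.Str.strip input) ",").getD [] with hl
    rw [paramLoopA_eq_foldl l PySem.Dict.empty hnd
        (fun p _ => PySem.Dict.contains_empty p)]
    have hitems := PySem.Dict.items_foldl_insert_fresh l (fun a => a)
        (fun _ => (none : Option String)) PySem.Dict.empty
        (fun a _ => PySem.Dict.contains_empty a) (by simpa using hnd)
    rw [show (PySem.Dict.empty : PySem.Dict String (Option String)).items = [] from rfl,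
        List.nil_append] at hitems
    have hsize : (List.foldl
        (fun (d : PySem.Dict String (Option String)) p => d.insert p none)
        PySem.Dict.empty l).size = l.length := by
      simp only [PySem.Dict.size]
      rw [show (List.foldl (fun (d : PySem.Dict String (Option String)) p => d.insert p none)
            PySem.Dict.empty l) = (List.foldl (fun d a => d.insert ((fun a => a) a)
            ((fun _ => (none : Option String)) a)) PySem.Dict.empty l) from rfl, hitems]
      simp
    dsimp only
    rw [dedup_of_nodup l hnd, if_neg (by simp : ¬ l.length ≠ l.length), hsize, hitems]
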